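-- pv_equiv track=rewrite | github.com/sbegum2/CompSci-Fundamentals | 11/recursive_strs.py | count_lower_recursive
-- ===== SOURCE A (Python) =====
-- def count_lower_recursive(string):
--
--     if string == "":
--         return 0
--
--     if string[0].islower():
--         part = count_lower_recursive(string[1:])
--         lowerR = 1 + part
--         return lowerR
--
--     else:
--         part = count_lower_recursive(string[1:])
--         lowerR = part
--         return lowerR
-- ===== SOURCE B (Python) =====
-- def count_lower_recursive(string):
--     counter = 0
--     for c in string:
--         if c.islower():
--             counter += 1
--     return counter
-- ===== Notes on version B (the rewrite author's own statement) =====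
-- stated objective: simpler
-- what changed: Replaced the head/tail recursion (one call and one string slice per character, quadratic in total) by a single iterative pass with an explicit counter.
import Mathlib
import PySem

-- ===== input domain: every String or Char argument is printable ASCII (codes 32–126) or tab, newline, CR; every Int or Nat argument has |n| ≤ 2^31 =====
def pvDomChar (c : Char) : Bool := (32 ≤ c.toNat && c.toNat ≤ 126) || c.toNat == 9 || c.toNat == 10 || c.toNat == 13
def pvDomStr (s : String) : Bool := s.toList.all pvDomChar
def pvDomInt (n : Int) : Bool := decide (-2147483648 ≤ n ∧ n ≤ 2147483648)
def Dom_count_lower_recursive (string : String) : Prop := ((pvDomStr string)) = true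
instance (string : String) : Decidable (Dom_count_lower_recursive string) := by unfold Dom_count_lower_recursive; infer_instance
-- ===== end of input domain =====

-- ===== PORT A =====
-- B replaces A's per-character recursion by one iterative pass with a counter (simpler).
-- recursion on the character list: '' check = empty list, string[0] = head, string[1:] = tail
def pvARec (cs : List Char) : Int :=
  match cs with
  | [] => 0
  | c :: rest =>
    if PySem.Chars.islower c then
      1 + pvARec rest
    else
      pvARec rest

def count_lower_recursive (string : String) : Int := pvARec string.toList

-- ===== PORT B =====
def count_lower_recursive_alt (string : String) : Int :=
  string.toList.foldl (fun counter c => if PySem.Chars.islower c then counter + 1 else counter) 0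

-- ===== PRECONDITION & SPEC =====
def Spec_count_lower_recursive (string : String) (out : Int) : Prop := out = count_lower_recursive_alt string
instance (string : String) (out : Int) : Decidable (Spec_count_lower_recursive string out) := by unfold Spec_count_lower_recursive; infer_instance

-- ===== CLAIM (what is proved, stated in full; the proofs are below) =====
def Claim_equal_count_lower_recursive : Prop := ∀ (string : String), Dom_count_lower_recursive string → Spec_count_lower_recursive string (count_lower_recursive string)

-- ===== LEMMAS AND PROOFS =====

-- ===== VERDICT (by name: the statement is the Claim_ definition above) =====
theorem pvFoldl_eq_rec (cs : List Char) (acc : Int) :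
    cs.foldl (fun counter c => if PySem.Chars.islower c then counter + 1 else counter) acc
      = acc + pvARec cs := by
  induction cs generalizing acc with
  | nil => simp [pvARec]
  | cons c rest ih =>
    simp only [List.foldl, pvARec]
    split_ifs <;> rw [ih] <;> ring

theorem count_lower_recursive_spec : Claim_equal_count_lower_recursive := by
  intro s _
  unfold Spec_count_lower_recursive count_lower_recursive count_lower_recursive_alt
  rw [pvFoldl_eq_rec]
  ring
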